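-- pv_equiv track=rewrite | github.com/adodea8991/69-Other | Ascii-draw/ascii.py | draw_circle
-- ===== SOURCE A (Python) =====
-- def draw_circle(radius):
--     circle = []
--     for y in range(-radius, radius + 1):
--         row = ""
--         for x in range(-radius, radius + 1):
--             if x**2 + y**2 <= radius**2:
--                 row += "@"
--             else:
--                 row += " "
--         circle.append(row)
--     return circle
-- ===== SOURCE B (Python) =====
-- import math
--
-- def draw_circle(radius):
--     rows = []
--     for y in range(-radius, radius + 1):
--         a = math.isqrt(radius * radius - y * y)
--         rows.append(" " * (radius - a) + "@" * (2 * a + 1) + " " * (radius - a))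
--     return rows
-- ===== Notes on version B (the rewrite author's own statement) =====
-- stated objective: faster
-- what changed: Replaces the inner x-scan testing x^2+y^2<=r^2 per cell with a per-row closed-form half-width a=math.isqrt(r*r-y*y), building each row by string repetition.
import Mathlib
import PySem

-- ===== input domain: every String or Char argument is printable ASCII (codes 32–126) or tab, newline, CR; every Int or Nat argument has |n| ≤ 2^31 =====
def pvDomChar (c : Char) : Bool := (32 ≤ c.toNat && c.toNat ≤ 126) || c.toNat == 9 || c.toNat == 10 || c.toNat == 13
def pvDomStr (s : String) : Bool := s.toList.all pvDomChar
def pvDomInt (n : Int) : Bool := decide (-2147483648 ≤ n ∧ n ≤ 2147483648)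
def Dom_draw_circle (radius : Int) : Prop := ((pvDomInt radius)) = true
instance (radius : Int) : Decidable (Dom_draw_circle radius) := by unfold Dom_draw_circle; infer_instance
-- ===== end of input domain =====

-- B replaces the per-cell x-scan by a per-row closed-form half-width (integer sqrt); return values agree for every radius.

-- ===== PORT A =====
-- literal port: outer loop appends rows, inner loop appends "@"/" " per cell
def draw_circle (radius : Int) : List String :=
  (PySem.List.pyRange (-radius) (radius + 1) 1).foldl
    (fun circle y =>
      circle ++ [(PySem.List.pyRange (-radius) (radius + 1) 1).foldl
        (fun row x => row ++ (if x ^ 2 + y ^ 2 ≤ radius ^ 2 then "@" else " ")) ""])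
    []

-- ===== PORT B =====
-- literal port of Source B: math.isqrt = Nat.sqrt on the (inside the loop nonnegative) argument;
-- Python " " * n with n ≤ 0 is "" — matched exactly by Int.toNat
def draw_circle_alt (radius : Int) : List String :=
  (PySem.List.pyRange (-radius) (radius + 1) 1).foldl
    (fun rows y =>
      let a : Int := (Nat.sqrt (radius * radius - y * y).toNat : Int)
      rows ++ [String.ofList (List.replicate (radius - a).toNat ' ') ++
               String.ofList (List.replicate (2 * a + 1).toNat '@') ++
               String.ofList (List.replicate (radius - a).toNat ' ')])
    []

-- ===== PRECONDITION & SPEC =====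
def Spec_draw_circle (radius : Int) (out : List String) : Prop := out = draw_circle_alt radius
instance (radius : Int) (out : List String) : Decidable (Spec_draw_circle radius out) := by unfold Spec_draw_circle; infer_instance

-- ===== CLAIM (what is proved, stated in full; the proofs are below) =====
def Claim_equal_draw_circle : Prop := ∀ (radius : Int), Dom_draw_circle radius → Spec_draw_circle radius (draw_circle radius)

-- ===== LEMMAS AND PROOFS =====

theorem foldl_push {α β : Type} (g : α → β) :
    ∀ (l : List α) (init : List β), l.foldl (fun acc y => acc ++ [g y]) init = init ++ l.map g := by
  intro l
  induction l with
  | nil => simp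
  | cons h t ih => intro init; simp [List.foldl, ih]

theorem foldl_str (g : Int → Char) (l : List Int) :
    ∀ s : List Char,
      l.foldl (fun row x => row ++ String.ofList [g x]) (String.ofList s) = String.ofList (s ++ l.map g) := by
  induction l with
  | nil => intro s; simp
  | cons h t ih =>
    intro s
    have hap : String.ofList s ++ String.ofList [g h] = String.ofList (s ++ [g h]) := by
      simp
    simp only [List.foldl, hap, ih]
    simp

theorem row_eq (radius y : Int) (hy1 : -radius ≤ y) (hy2 : y < radius + 1) :
    (PySem.List.pyRange (-radius) (radius + 1) 1).map
        (fun x => if x ^ 2 + y ^ 2 ≤ radius ^ 2 then '@' else ' ')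
      = List.replicate (radius - (Nat.sqrt (radius * radius - y * y).toNat : Int)).toNat ' ' ++
        List.replicate (2 * (Nat.sqrt (radius * radius - y * y).toNat : Int) + 1).toNat '@' ++
        List.replicate (radius - (Nat.sqrt (radius * radius - y * y).toNat : Int)).toNat ' ' := by
  set a : Int := (Nat.sqrt (radius * radius - y * y).toNat : Int) with ha
  have hr0 : 0 ≤ radius := by omega
  have hm : 0 ≤ radius * radius - y * y := by nlinarith
  have ha0 : 0 ≤ a := by positivity
  have hm' : ((radius * radius - y * y).toNat : Int) = radius * radius - y * y := by omega
  have ha2 : a ^ 2 ≤ radius * radius - y * y := by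
    rw [ha, ← hm']; exact_mod_cast Nat.sqrt_le' (radius * radius - y * y).toNat
  have ha3 : radius * radius - y * y < (a + 1) ^ 2 := by
    rw [ha, ← hm']; exact_mod_cast Nat.lt_succ_sqrt' (radius * radius - y * y).toNat
  have haR : a ≤ radius := by nlinarith
  have e1 : (PySem.List.pyRange (-radius) (-a) 1).map
      (fun x => if x ^ 2 + y ^ 2 ≤ radius ^ 2 then '@' else ' ')
      = List.replicate (radius - a).toNat ' ' := by
    rw [List.eq_replicate_iff]
    refine ⟨by rw [List.length_map, PySem.List.length_pyRange_one]; omega, ?_⟩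
    intro b hb
    obtain ⟨x, hx, rfl⟩ := List.mem_map.1 hb
    rw [PySem.List.mem_pyRange_one] at hx
    have hxlt : x ≤ -(a + 1) := by omega
    have hgt : ¬ (x ^ 2 + y ^ 2 ≤ radius ^ 2) := by simp only [pow_two] at *; nlinarith
    simp [hgt]
  have e2 : (PySem.List.pyRange (-a) (a + 1) 1).map
      (fun x => if x ^ 2 + y ^ 2 ≤ radius ^ 2 then '@' else ' ')
      = List.replicate (2 * a + 1).toNat '@' := by
    rw [List.eq_replicate_iff]
    refine ⟨by rw [List.length_map, PySem.List.length_pyRange_one]; omega, ?_⟩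
    intro b hb
    obtain ⟨x, hx, rfl⟩ := List.mem_map.1 hb
    rw [PySem.List.mem_pyRange_one] at hx
    have hle : x ^ 2 + y ^ 2 ≤ radius ^ 2 := by simp only [pow_two] at *; nlinarith
    simp [hle]
  have e3 : (PySem.List.pyRange (a + 1) (radius + 1) 1).map
      (fun x => if x ^ 2 + y ^ 2 ≤ radius ^ 2 then '@' else ' ')
      = List.replicate (radius - a).toNat ' ' := by
    rw [List.eq_replicate_iff]
    refine ⟨by rw [List.length_map, PySem.List.length_pyRange_one]; omega, ?_⟩
    intro b hb
    obtain ⟨x, hx, rfl⟩ := List.mem_map.1 hb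
    rw [PySem.List.mem_pyRange_one] at hx
    have hxgt : a + 1 ≤ x := hx.1
    have hgt : ¬ (x ^ 2 + y ^ 2 ≤ radius ^ 2) := by simp only [pow_two] at *; nlinarith
    simp [hgt]
  rw [PySem.List.pyRange_one_append (-radius) (-a) (radius + 1) (by omega) (by omega),
      PySem.List.pyRange_one_append (-a) (a + 1) (radius + 1) (by omega) (by omega),
      List.map_append, List.map_append, e1, e2, e3, List.append_assoc]

-- ===== VERDICT (by name: the statement is the Claim_ definition above) =====
theorem draw_circle_spec : Claim_equal_draw_circle := by
  intro radius _
  unfold Spec_draw_circle draw_circle draw_circle_alt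
  rw [foldl_push, foldl_push]
  simp only [List.nil_append]
  apply List.map_congr_left
  intro y hy
  rw [PySem.List.mem_pyRange_one] at hy
  have hfun : (fun (row : String) x => row ++ (if x ^ 2 + y ^ 2 ≤ radius ^ 2 then "@" else " "))
      = (fun (row : String) x => row ++ String.ofList [if x ^ 2 + y ^ 2 ≤ radius ^ 2 then '@' else ' ']) := by
    funext row x
    split <;> rfl
  show (PySem.List.pyRange (-radius) (radius + 1) 1).foldl
        (fun row x => row ++ (if x ^ 2 + y ^ 2 ≤ radius ^ 2 then "@" else " ")) "" = _
  rw [hfun]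
  have h0 : ("" : String) = String.ofList [] := rfl
  rw [h0, foldl_str (fun x => if x ^ 2 + y ^ 2 ≤ radius ^ 2 then '@' else ' ')]
  rw [List.nil_append, row_eq radius y hy.1 hy.2]
  rw [← String.ofList_append, ← String.ofList_append, List.append_assoc]
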